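-- pv_equiv track=rewrite | github.com/electrixoul/sae_demo | neural_sae_original_comparison.py | create_stimulus_labels
-- ===== SOURCE A (Python) =====
-- from typing import Dict, List, Tuple
--
-- def create_stimulus_labels(labels: List[str],
--                           stimulus_types: List[str]) -> List[str]:
--     """为每个样本创建刺激类型标签"""
--     stimulus_labels = []
--
--     samples_per_stimulus = len(labels) // len(stimulus_types)
--
--     for i, stimulus in enumerate(stimulus_types):
--         start_idx = i * samples_per_stimulus
--         end_idx = start_idx + samples_per_stimulus
--
--         for j in range(start_idx, min(end_idx, len(labels))):
--             stimulus_labels.append(stimulus)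
--
--     # 处理剩余样本
--     while len(stimulus_labels) < len(labels):
--         stimulus_labels.append(stimulus_types[-1])
--
--     return stimulus_labels
-- ===== SOURCE B (Python) =====
-- def create_stimulus_labels(labels, stimulus_types):
--     n = len(labels)
--     k = n // len(stimulus_types)
--     if k == 0:
--         return [stimulus_types[-1]] * n
--     m = len(stimulus_types)
--     return [stimulus_types[min(idx // k, m - 1)] for idx in range(n)]
-- ===== Notes on version B (the rewrite author's own statement) =====
-- stated objective: simpler
-- what changed: Replaces the nested block-building loop plus trailing while-pad loop with a single comprehension stimulus_types[min(idx//k, m-1)] over output positions (the min-clamp subsumes the padding), with a direct [last]*n answer when k == 0.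
import Mathlib
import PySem

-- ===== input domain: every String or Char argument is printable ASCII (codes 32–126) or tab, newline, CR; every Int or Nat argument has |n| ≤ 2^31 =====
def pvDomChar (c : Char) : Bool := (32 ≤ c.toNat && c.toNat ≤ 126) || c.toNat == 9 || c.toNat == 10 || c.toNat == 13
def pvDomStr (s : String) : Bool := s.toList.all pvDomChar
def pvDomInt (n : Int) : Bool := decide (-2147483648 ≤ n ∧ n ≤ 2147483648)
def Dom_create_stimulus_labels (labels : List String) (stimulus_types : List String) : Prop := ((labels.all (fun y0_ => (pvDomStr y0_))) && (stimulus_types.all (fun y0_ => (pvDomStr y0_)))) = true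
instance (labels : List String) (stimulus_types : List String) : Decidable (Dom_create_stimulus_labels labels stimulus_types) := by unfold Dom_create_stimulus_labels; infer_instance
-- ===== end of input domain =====

-- B replaces A's nested block loop + while-pad loop by a single clamped-index comprehension ('simpler').

-- ===== PORT A =====
-- the trailing 'while len(stimulus_labels) < len(labels): append stimulus_types[-1]' loop
def padWhile (n : Nat) (stimulus_types : List String) (acc : List String) : List String :=
  if acc.length < n then
    padWhile n stimulus_types (acc ++ [(PySem.List.pyGet? stimulus_types (-1)).getD ""])
  else acc
termination_by n - acc.length
decreasing_by simp; omega

def create_stimulus_labels (labels : List String) (stimulus_types : List String) : List String :=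
  let n := labels.length
  let samples_per_stimulus := n / stimulus_types.length
  let body := (List.range stimulus_types.length).foldl
    (fun acc i =>
      let start_idx := i * samples_per_stimulus
      let end_idx := start_idx + samples_per_stimulus
      (List.range' start_idx (min end_idx n - start_idx)).foldl
        (fun acc2 _ => acc2 ++ [stimulus_types.getD i ""]) acc) []
  padWhile n stimulus_types body

-- ===== PORT B =====
def create_stimulus_labels_alt (labels : List String) (stimulus_types : List String) : List String :=
  let n := labels.length
  let k := n / stimulus_types.length
  if k = 0 then
    List.replicate n ((PySem.List.pyGet? stimulus_types (-1)).getD "")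
  else
    (List.range n).map (fun idx =>
      stimulus_types.getD (min (idx / k) (stimulus_types.length - 1)) "")

-- ===== PRECONDITION & SPEC =====
-- A raises ZeroDivisionError when stimulus_types is empty; Pre_ excludes exactly that.
def Pre_create_stimulus_labels (labels : List String) (stimulus_types : List String) : Prop :=
  stimulus_types ≠ []
instance (labels : List String) (stimulus_types : List String) : Decidable (Pre_create_stimulus_labels labels stimulus_types) := by unfold Pre_create_stimulus_labels; infer_instance

def pvWitness_create_stimulus_labels : List String × List String := (["a", "b", "c", "d", "e"], ["s1", "s2"])

def Spec_create_stimulus_labels (labels : List String) (stimulus_types : List String) (out : List String) : Prop := out = create_stimulus_labels_alt labels stimulus_types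
instance (labels : List String) (stimulus_types : List String) (out : List String) : Decidable (Spec_create_stimulus_labels labels stimulus_types out) := by unfold Spec_create_stimulus_labels; infer_instance

-- ===== CLAIM (what is proved, stated in full; the proofs are below) =====
def Claim_equal_create_stimulus_labels : Prop := ∀ (labels : List String) (stimulus_types : List String), Dom_create_stimulus_labels labels stimulus_types → Pre_create_stimulus_labels labels stimulus_types → Spec_create_stimulus_labels labels stimulus_types (create_stimulus_labels labels stimulus_types)

-- ===== LEMMAS AND PROOFS =====

theorem padWhile_eq (n : Nat) (sts : List String) (acc : List String) :
    padWhile n sts acc = acc ++ List.replicate (n - acc.length) ((PySem.List.pyGet? sts (-1)).getD "") := by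
  induction acc using padWhile.induct n sts with
  | case1 acc h ih =>
      rw [padWhile]; simp only [h, if_true]
      rw [ih]; simp only [List.append_assoc, List.length_append, List.length_singleton]
      congr 1
      have : n - acc.length = (n - (acc.length + 1)) + 1 := by omega
      rw [this, List.replicate_succ]; simp
  | case2 acc h =>
      rw [padWhile]; simp only [h, if_false]
      have : n - acc.length = 0 := by omega
      simp [this]

theorem body_eq_gen (sts : List String) (n k : Nat) (hk : 0 < k) (m : Nat) (hm : m * k ≤ n) :
    (List.range m).foldl
      (fun acc i =>
        (List.range' (i * k) (min (i * k + k) n - i * k)).foldl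
          (fun acc2 _ => acc2 ++ [sts.getD i ""]) acc) [] =
    (List.range (m * k)).map (fun idx => sts.getD (idx / k) "") := by
  induction m with
  | zero => simp
  | succ m ih =>
      have hm' : m * k ≤ n := le_trans (by nlinarith) hm
      rw [List.range_succ, List.foldl_append, ih hm']
      simp only [List.foldl_cons, List.foldl_nil]
      have hcount : min (m * k + k) n - m * k = k := by
        have : m * k + k ≤ n := by nlinarith
        omega
      rw [hcount, PySem.List.foldl_append_singleton_eq_map]
      have : (m + 1) * k = m * k + k := by ring
      rw [this, List.range_add, List.map_append]
      congr 1
      · have h2 : ∀ x ∈ List.range k,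
            ((fun idx => sts.getD (idx / k) "") ∘ fun x => m * k + x) x = sts.getD m "" := by
          intro x hx
          simp only [List.mem_range] at hx
          have hdiv : (m * k + x) / k = m := by
            rw [Nat.add_comm, Nat.add_mul_div_right _ _ hk, Nat.div_eq_of_lt hx]; omega
          simp [hdiv]
        rw [List.map_map, List.map_congr_left h2, List.map_const', List.map_const']
        simp

theorem create_stimulus_labels_spec' (labels sts : List String) (h : sts ≠ []) :
    create_stimulus_labels labels sts = create_stimulus_labels_alt labels sts := by
  have hm1 : 1 ≤ sts.length := List.length_pos_iff.mpr h
  simp only [create_stimulus_labels, create_stimulus_labels_alt]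
  by_cases hk : labels.length / sts.length = 0
  · simp only [hk, if_pos, Nat.mul_zero, Nat.add_zero, Nat.zero_min,
      Nat.sub_zero, List.range'_zero, List.foldl_nil]
    have hfix : (List.range sts.length).foldl (fun (acc : List String) (_ : Nat) => acc) [] = ([] : List String) := by
      induction List.range sts.length with
      | nil => rfl
      | cons a l ih => simp only [List.foldl_cons]; exact ih
    rw [hfix, padWhile_eq]
    simp
  · rw [if_neg hk]
    have hkpos : 0 < labels.length / sts.length := Nat.pos_of_ne_zero hk
    set n := labels.length with hn
    set k := n / sts.length with hkdef
    set m := sts.length with hmdef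
    have hmk : m * k ≤ n := by
      rw [hkdef, Nat.mul_comm]
      exact Nat.div_mul_le_self n m
    rw [body_eq_gen sts n k hkpos m hmk, padWhile_eq]
    have hc : (PySem.List.pyGet? sts (-1)).getD "" = sts.getD (m - 1) "" := by
      rw [PySem.List.pyGet?_neg_one, List.getLast?_eq_getElem?, List.getD_eq_getElem?_getD, hmdef]
    have hsplit : List.range n = List.range (m * k) ++ (List.range (n - m * k)).map (fun x => m * k + x) := by
      rw [← List.range_add]
      congr 1
      omega
    rw [hsplit, List.map_append]
    simp only [List.length_map, List.length_range]
    congr 1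
    · apply List.map_congr_left
      intro idx hidx
      simp only [List.mem_range] at hidx
      have h1 : idx / k < m := (Nat.div_lt_iff_lt_mul hkpos).mpr hidx
      have h2 : min (idx / k) (m - 1) = idx / k := by omega
      rw [h2]
    · have h2 : ∀ x ∈ List.range (n - m * k),
          ((fun idx => sts.getD (min (idx / k) (m - 1)) "") ∘ fun x => m * k + x) x = sts.getD (m - 1) "" := by
        intro x hx
        have hdiv : m ≤ (m * k + x) / k :=
          (Nat.le_div_iff_mul_le hkpos).mpr (by omega)
        have : min ((m * k + x) / k) (m - 1) = m - 1 := by omega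
        simp only [Function.comp_apply, this]
      rw [List.map_map, List.map_congr_left h2, List.map_const']
      simp [hc]

-- ===== VERDICT (by name: the statement is the Claim_ definition above) =====
theorem create_stimulus_labels_spec : Claim_equal_create_stimulus_labels := by
  intro labels sts _ hpre
  exact create_stimulus_labels_spec' labels sts hpre
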